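-- pv_equiv track=rewrite | github.com/michaelcrichlow/2025_03_14---Leetcode-2226.-Maximum-Candies-Allocated-to-K-Children | test_03.py | maximumCandies_01
-- ===== SOURCE A (Python) =====
-- def maximumCandies_01(candies: list[int], k: int) -> int:
--     if sum(candies) < k:
--         return 0
--
--     while k > len(candies):
--         _amount_moved_over = max(candies) - min(candies)
--         _index_to_modify = candies.index(max(candies))
--         candies[_index_to_modify] = min(candies)
--         candies.append(_amount_moved_over)
--
--     _min = min(candies)
--     _average = sum(candies) // k
--
--     return min(_min, _average)
-- ===== SOURCE B (Python) =====
-- def maximumCandies_01(candies: list[int], k: int) -> int: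
--     # Sum is invariant under a split, so compute it once; simulate the splits on a
--     # sorted list: the max is popped from the end, the two new piles are put back
--     # with ordered inserts. (Does not mutate the caller's list, unlike A.)
--     total = sum(candies)
--     if total < k:
--         return 0
--     s = sorted(candies)
--     for _ in range(k - len(s)):
--         m = s[0]
--         top = s.pop()
--         _insort(s, top - m)
--         _insort(s, m)
--     return min(s[0], total // k)
--
--
-- def _insort(s: list[int], x: int) -> None:
--     i = 0
--     while i < len(s) and s[i] < x:
--         i += 1
--     s.insert(i, x)
-- ===== Notes on version B (the rewrite author's own statement) =====
-- stated objective: alternative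
-- what changed: B exploits that the total is invariant under a split (computes sum once) and simulates the splits on a sorted list -- pop the max from the end, ordered-insert the two new piles -- instead of A's repeated full max/min/index scans and in-place mutation of the input.
import Mathlib
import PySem

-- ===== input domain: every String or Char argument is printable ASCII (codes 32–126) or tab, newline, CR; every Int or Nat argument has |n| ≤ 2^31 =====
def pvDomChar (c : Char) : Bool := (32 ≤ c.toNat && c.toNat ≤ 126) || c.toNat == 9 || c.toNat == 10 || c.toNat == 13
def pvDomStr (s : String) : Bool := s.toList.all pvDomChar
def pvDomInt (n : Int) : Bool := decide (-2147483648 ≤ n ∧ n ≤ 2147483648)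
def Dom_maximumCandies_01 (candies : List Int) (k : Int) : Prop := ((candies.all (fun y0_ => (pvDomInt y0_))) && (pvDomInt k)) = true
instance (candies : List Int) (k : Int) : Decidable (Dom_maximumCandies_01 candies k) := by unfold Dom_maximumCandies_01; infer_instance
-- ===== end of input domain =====

-- B keeps the candy multiset as a sorted list (sum computed once, max popped from the end,
-- the two new piles ordered-inserted) instead of A's repeated max/min/index scans; note A
-- mutates the caller's list in place (B does not) — only the return value is claimed equal.

-- ===== PORT A =====
-- one body of A's while loop; max()/min() of an empty list raise ValueError in Python,
-- here they read through `.getD 0` — unreachable whenever the loop is entered under Pre_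
def pyAStep (c : List Int) : List Int :=
  let M := (PySem.List.max? c (fun x => x)).getD 0
  let m := (PySem.List.min? c (fun x => x)).getD 0
  let i := (PySem.List.index? c M).getD 0
  (c.set i m) ++ [M - m]

theorem pyAStep_length (c : List Int) : (pyAStep c).length = c.length + 1 := by
  unfold pyAStep
  simp

def aWhile (k : Int) (c : List Int) : List Int :=
  if k > c.length then aWhile k (pyAStep c) else c
termination_by (k - c.length).toNat
decreasing_by
  have h := pyAStep_length c
  omega

def maximumCandies_01 (candies : List Int) (k : Int) : Int :=
  if candies.sum < k then 0
  else
    let c := aWhile k candies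
    -- Python's min(candies) raises on [] and sum//k raises for k = 0; Pre_ excludes both
    let mn := (PySem.List.min? c (fun x => x)).getD 0
    let avg := PySem.Int.floordiv c.sum k
    min mn avg

-- ===== PORT B =====
-- Source B's _insort: linear scan to the first element ≥ x, insert there
def insortB : List Int → Int → List Int
  | [], x => [x]
  | y :: ys, x => if y < x then y :: insortB ys x else x :: y :: ys

-- Source B's for-loop; s[0]/s.pop() on an empty list raise in Python (unreachable under Pre_)
def bLoop : Nat → List Int → List Int
  | 0, s => s
  | n + 1, s =>
      let m := s.headD 0
      let top := s.getLast?.getD 0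
      let s1 := s.dropLast
      bLoop n (insortB (insortB s1 (top - m)) m)

def maximumCandies_01_alt (candies : List Int) (k : Int) : Int :=
  let total := candies.sum
  if total < k then 0
  else
    let s := bLoop (k - (candies.length : Int)).toNat
               (PySem.List.sorted candies (fun x => x) false)
    min (s.headD 0) (PySem.Int.floordiv total k)

-- ===== PRECONDITION & SPEC =====
-- Pre_ excludes exactly the inputs where the Python A raises: min([]) (ValueError,
-- when candies = [] and k ≤ 0) and sum//0 (ZeroDivisionError, when k = 0 and the
-- early return 0 is not taken); A returns normally everywhere else.
def Pre_maximumCandies_01 (candies : List Int) (k : Int) : Prop :=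
  (candies = [] → 0 < k) ∧ (k = 0 → candies.sum < 0)
instance (candies : List Int) (k : Int) : Decidable (Pre_maximumCandies_01 candies k) := by
  unfold Pre_maximumCandies_01; infer_instance
def pvWitness_maximumCandies_01 : List Int × Int := ([5, 8, 6], 3)

def Spec_maximumCandies_01 (candies : List Int) (k : Int) (out : Int) : Prop := out = maximumCandies_01_alt candies k
instance (candies : List Int) (k : Int) (out : Int) : Decidable (Spec_maximumCandies_01 candies k out) := by unfold Spec_maximumCandies_01; infer_instance

-- ===== CLAIM (what is proved, stated in full; the proofs are below) =====
def Claim_equal_maximumCandies_01 : Prop := ∀ (candies : List Int) (k : Int), Dom_maximumCandies_01 candies k → Pre_maximumCandies_01 candies k → Spec_maximumCandies_01 candies k (maximumCandies_01 candies k)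

-- ===== LEMMAS AND PROOFS =====

theorem insortB_perm (s : List Int) (x : Int) : (insortB s x).Perm (x :: s) := by
  induction s with
  | nil => simp [insortB]
  | cons y ys ih =>
      unfold insortB
      split
      · exact ((ih.cons y).trans (List.Perm.swap x y ys))
      · exact List.Perm.refl _

theorem insortB_sorted (s : List Int) (x : Int) (hs : s.Pairwise (· ≤ ·)) :
    (insortB s x).Pairwise (· ≤ ·) := by
  induction s with
  | nil => simp [insortB]
  | cons y ys ih =>
      unfold insortB
      rcases List.pairwise_cons.mp hs with ⟨hy, hys⟩
      split
      · rename_i hlt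
        refine List.pairwise_cons.mpr ⟨?_, ih hys⟩
        intro b hb
        rcases List.mem_cons.mp ((insortB_perm ys x).mem_iff.mp hb) with rfl | hb
        · omega
        · exact hy b hb
      · rename_i hge
        refine List.pairwise_cons.mpr ⟨?_, hs⟩
        intro b hb
        rcases List.mem_cons.mp hb with rfl | hb
        · omega
        · exact le_trans (by omega) (hy b hb)

theorem sorted_le_getLast : ∀ (s : List Int), s.Pairwise (· ≤ ·) → ∀ (h : s ≠ [])
    (y : Int), y ∈ s → y ≤ s.getLast h := by
  intro s
  induction s with
  | nil => intro _ h; cases h rfl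
  | cons a t ih =>
      intro hs h y hy
      rcases List.pairwise_cons.mp hs with ⟨ha, ht⟩
      cases t with
      | nil => simp at hy; simp [hy]
      | cons b u =>
          rw [List.getLast_cons (by simp)]
          rcases List.mem_cons.mp hy with rfl | hy2
          · exact le_trans (ha b (by simp)) (ih ht (by simp) b (by simp))
          · exact ih ht (by simp) y hy2

theorem sorted_head_le (s : List Int) (hs : s.Pairwise (· ≤ ·)) (y : Int) (hy : y ∈ s) :
    s.headD 0 ≤ y := by
  cases s with
  | nil => cases hy
  | cons a t =>
      rcases List.pairwise_cons.mp hs with ⟨ha, _⟩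
      rcases List.mem_cons.mp hy with rfl | hy
      · simp
      · simpa using ha y hy

-- main invariant: along the loops, B's sorted list stays a permutation of A's list
theorem loop_invariant : ∀ (n : Nat) (k : Int) (c s : List Int), s.Perm c →
    s.Pairwise (· ≤ ·) → c ≠ [] → (k - (c.length : Int)).toNat = n →
    (bLoop n s).Perm (aWhile k c) ∧ (aWhile k c).sum = c.sum ∧
      (bLoop n s).Pairwise (· ≤ ·) ∧ aWhile k c ≠ [] := by
  intro n
  induction n with
  | zero =>
      intro k c s hperm hsort hne hn
      rw [aWhile]
      rw [if_neg (by omega)]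
      exact ⟨hperm, rfl, hsort, hne⟩
  | succ n ih =>
      intro k c s hperm hsort hne hn
      -- the loop is entered
      have hk : k > (c.length : Int) := by omega
      have hsne : s ≠ [] := by
        intro h; subst h; exact hne (hperm.nil_eq.symm ▸ rfl)
      -- A's max and min exist
      obtain ⟨M, hM⟩ : ∃ M, PySem.List.max? c (fun x => x) = some M := by
        cases hmx : PySem.List.max? c (fun x => x) with
        | none => exact absurd ((PySem.List.max?_eq_none_iff _ _).mp hmx) hne
        | some M => exact ⟨M, rfl⟩
      obtain ⟨m, hm⟩ : ∃ m, PySem.List.min? c (fun x => x) = some m := by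
        cases hmn : PySem.List.min? c (fun x => x) with
        | none => exact absurd ((PySem.List.min?_eq_none_iff _ _).mp hmn) hne
        | some m => exact ⟨m, rfl⟩
      have hMmem : M ∈ c := PySem.List.max?_mem hM
      have hMmax : ∀ y ∈ c, y ≤ M := by
        intro y hy; simpa using PySem.List.max?_isMax hM y hy
      have hmmem : m ∈ c := PySem.List.min?_mem hm
      have hmmin : ∀ y ∈ c, m ≤ y := by
        intro y hy; simpa using PySem.List.min?_isMin hm y hy
      -- B's head and last are that min and max
      have hhead : s.headD 0 = m := by
        have h1 : s.headD 0 ≤ m := sorted_head_le s hsort m (hperm.mem_iff.mpr hmmem)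
        have h2 : m ≤ s.headD 0 := by
          cases s with
          | nil => exact absurd rfl hsne
          | cons a t => exact hmmin a (hperm.mem_iff.mp (by simp))
        omega
      have hlast : s.getLast?.getD 0 = M := by
        have hgl : s.getLast? = some (s.getLast hsne) := List.getLast?_eq_getLast hsne
        have h1 : s.getLast hsne ≤ M :=
          hMmax _ (hperm.mem_iff.mp (List.getLast_mem hsne))
        have h2 : M ≤ s.getLast hsne :=
          sorted_le_getLast s hsort hsne M (hperm.mem_iff.mpr hMmem)
        rw [hgl]; simp; omega
      -- A's step, as a permutation
      obtain ⟨i, hi⟩ : ∃ i, PySem.List.index? c M = some i := by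
        cases hidx : PySem.List.index? c M with
        | none => exact absurd ((PySem.List.index?_eq_none_iff _ _).mp hidx) (by simp [hMmem])
        | some i => exact ⟨i, rfl⟩
      obtain ⟨hilt, hci, -⟩ := PySem.List.getElem_of_index?_eq_some hi
      have hsplit : c = c.take i ++ M :: c.drop (i + 1) := by
        conv_lhs => rw [← List.take_append_drop i c]
        rw [← List.getElem_cons_drop hilt, hci]
      have hcperm : c.Perm (M :: (c.take i ++ c.drop (i + 1))) := by
        conv_lhs => rw [hsplit]
        exact List.perm_middle.trans (List.Perm.refl _)
      have hsetperm : (c.set i m).Perm (m :: (c.take i ++ c.drop (i + 1))) := by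
        rw [List.set_eq_take_append_cons_drop, if_pos hilt]
        exact List.perm_middle
      have hA0 : pyAStep c = (c.set i m) ++ [M - m] := by
        have h0 : pyAStep c =
            (c.set ((PySem.List.index? c ((PySem.List.max? c (fun x => x)).getD 0)).getD 0)
              ((PySem.List.min? c (fun x => x)).getD 0)) ++
              [((PySem.List.max? c (fun x => x)).getD 0) -
                ((PySem.List.min? c (fun x => x)).getD 0)] := rfl
        rw [h0, hM, hm]
        simp only [Option.getD_some]
        rw [hi]
        rfl
      have hstepA : (pyAStep c).Perm ((M - m) :: m :: (c.take i ++ c.drop (i + 1))) := by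
        rw [hA0]
        exact (List.perm_append_singleton _ _).trans (hsetperm.cons _)
      -- B's step is a permutation of A's step
      have hs1 : s = s.dropLast ++ [s.getLast?.getD 0] := by
        conv_lhs => rw [← List.dropLast_concat_getLast hsne]
        rw [List.getLast?_eq_getLast hsne]; simp
      have hdropperm : (s.dropLast).Perm (c.take i ++ c.drop (i + 1)) := by
        have h0 : s = s.dropLast ++ [M] := by rw [← hlast]; exact hs1
        have h1 : (M :: s.dropLast).Perm (M :: (c.take i ++ c.drop (i + 1))) := by
          refine List.Perm.trans ?_ (hperm.trans hcperm)
          refine List.Perm.trans (List.perm_append_singleton M _).symm ?_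
          rw [← h0]
        exact h1.cons_inv
      have hstepB :
          (insortB (insortB s.dropLast (s.getLast?.getD 0 - s.headD 0)) (s.headD 0)).Perm (pyAStep c) := by
        rw [hhead, hlast]
        have h1 := insortB_perm (insortB s.dropLast (M - m)) m
        have h2 := (insortB_perm s.dropLast (M - m)).cons m
        refine (h1.trans h2).trans ?_
        refine List.Perm.trans ?_ hstepA.symm
        exact ((hdropperm.cons (M - m)).cons m).trans (List.Perm.swap (M - m) m _)
      -- assemble the inductive step
      have hsort' : (insortB (insortB s.dropLast (s.getLast?.getD 0 - s.headD 0)) (s.headD 0)).Pairwise (· ≤ ·) :=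
        insortB_sorted _ _ (insortB_sorted _ _ (List.Pairwise.sublist (List.dropLast_sublist s) hsort))
      have hlen : (pyAStep c).length = c.length + 1 := pyAStep_length c
      have hfuel : (k - ((pyAStep c).length : Int)).toNat = n := by
        rw [hlen]; push_cast; omega
      have hne' : pyAStep c ≠ [] := by
        intro h
        have := pyAStep_length c
        rw [h] at this; simp at this
      obtain ⟨p1, p2, p3, p4⟩ := ih k (pyAStep c) _ hstepB hsort' hne' hfuel
      have hsum : (pyAStep c).sum = c.sum := by
        have e1 := hstepA.sum_eq
        have e2 := hcperm.sum_eq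
        simp only [List.sum_cons] at e1 e2
        omega
      refine ⟨?_, ?_, p3, ?_⟩
      · rw [aWhile, if_pos hk]
        simpa [bLoop] using p1
      · rw [aWhile, if_pos hk]
        rw [p2, hsum]
      · rw [aWhile, if_pos hk]
        exact p4

-- ===== VERDICT (by name: the statement is the Claim_ definition above) =====
theorem maximumCandies_01_spec : Claim_equal_maximumCandies_01 := by
  intro candies k _hdom hpre
  unfold Spec_maximumCandies_01 maximumCandies_01 maximumCandies_01_alt
  by_cases hlt : candies.sum < k
  · simp [hlt]
  · rw [if_neg hlt, if_neg hlt]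
    have hne : candies ≠ [] := by
      intro h
      rcases hpre with ⟨h1, -⟩
      have := h1 h
      rw [h] at hlt
      simp at hlt
      omega
    have hsperm : (PySem.List.sorted candies (fun x => x) false).Perm candies :=
      PySem.List.sorted_perm candies (fun x => x) false
    have hssort : (PySem.List.sorted candies (fun x => x) false).Pairwise (· ≤ ·) := by
      have := PySem.List.sorted_pairwise (xs := candies) (key := fun x => x)
      simpa [List.Sorted] using this
    obtain ⟨p1, p2, p3, p4⟩ := loop_invariant (k - (candies.length : Int)).toNat k candies _
      hsperm hssort hne rfl
    -- the two min components agree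
    obtain ⟨v, hv⟩ : ∃ v, PySem.List.min? (aWhile k candies) (fun x => x) = some v := by
      cases hmn : PySem.List.min? (aWhile k candies) (fun x => x) with
      | none => exact absurd ((PySem.List.min?_eq_none_iff _ _).mp hmn) p4
      | some v => exact ⟨v, rfl⟩
    have hvmem : v ∈ aWhile k candies := PySem.List.min?_mem hv
    have hvmin : ∀ y ∈ aWhile k candies, v ≤ y := by
      intro y hy; simpa using PySem.List.min?_isMin hv y hy
    have hheadv :
        (bLoop (k - (candies.length : Int)).toNat (PySem.List.sorted candies (fun x => x) false)).headD 0 = v := by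
      have h1 := sorted_head_le _ p3 v (p1.mem_iff.mpr hvmem)
      have h2 : v ≤ (bLoop (k - (candies.length : Int)).toNat (PySem.List.sorted candies (fun x => x) false)).headD 0 := by
        cases hb : bLoop (k - (candies.length : Int)).toNat (PySem.List.sorted candies (fun x => x) false) with
        | nil => exact absurd (hb ▸ p1).nil_eq.symm p4
        | cons a t => exact hvmin a ((hb ▸ p1).mem_iff.mp (by simp))
      omega
    show min ((PySem.List.min? (aWhile k candies) (fun x => x)).getD 0)
          (PySem.Int.floordiv (aWhile k candies).sum k)
        = min ((bLoop (k - (candies.length : Int)).toNat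
              (PySem.List.sorted candies (fun x => x) false)).headD 0)
          (PySem.Int.floordiv candies.sum k)
    rw [hv, hheadv, p2]
    simp
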